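-- pv_equiv track=rewrite | github.com/LucasCoppens/PromoterAtlas | src/promoter_atlas/annotation/genbank_annotator.py | find_consecutive_segments
-- ===== SOURCE A (Python) =====
-- def find_consecutive_segments(predictions, min_length=4):
--     """Find segments with at least min_length consecutive same predictions."""
--     segments = []
--     current_label = predictions[0]
--     current_start = 0
--     current_length = 1
--
--     for i in range(1, len(predictions)):
--         if predictions[i] == current_label:
--             current_length += 1
--         else:
--             if current_length >= min_length and current_label != 0:  # Ignore label 0
--                 segments.append({
--                     'label': current_label,
--                     'start': current_start,
--                     'end': i
--                 })
--             current_label = predictions[i]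
--             current_start = i
--             current_length = 1
--
--     # Check last segment
--     if current_length >= min_length and current_label != 0:
--         segments.append({
--             'label': current_label,
--             'start': current_start,
--             'end': len(predictions)
--         })
--
--     # Apply co-occurrence rules
--     return apply_cooccurrence_rules(segments)
--
-- def apply_cooccurrence_rules(segments):
--     """Apply co-occurrence rules for promoter element pairs."""
--     # Define pairs that must co-occur
--     required_pairs = [(2, 3), (4, 5), (6, 7), (8, 9), (10, 11)]
--
--     # Get existing labels
--     existing_labels = set(segment['label'] for segment in segments)
--
--     # Identify which segments to keep
--     segments_to_keep = []
--
--     for segment in segments: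
--         label = segment['label']
--         keep_segment = True
--
--         # Check if this label is part of a required pair
--         for pair in required_pairs:
--             if label in pair:
--                 # Find the partner label
--                 partner_label = pair[1] if label == pair[0] else pair[0]
--
--                 # If partner doesn't exist, mark for removal
--                 if partner_label not in existing_labels:
--                     keep_segment = False
--                     break
--
--         if keep_segment:
--             segments_to_keep.append(segment)
--
--     return segments_to_keep
-- ===== SOURCE B (Python) =====
-- def find_consecutive_segments(predictions, min_length=4):
--     """Divide-and-conquer re-implementation: compute the maximal equal-value runs
--     of predictions as (label, start, end) triples by recursively splitting the
--     index range in half and merging the two run lists at the boundary, turn the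
--     long nonzero runs into segment dicts, then drop segments whose label belongs
--     to a required pair of which exactly one member is present."""
--     runs = _runs(predictions, 0, len(predictions))
--     segments = [{'label': l, 'start': a, 'end': b}
--                 for l, a, b in runs if b - a >= min_length and l != 0]
--     present = {s['label'] for s in segments}
--     pairs = [(2, 3), (4, 5), (6, 7), (8, 9), (10, 11)]
--     incomplete = {l for a, b in pairs if (a in present) != (b in present) for l in (a, b)}
--     return [s for s in segments if s['label'] not in incomplete]
--
--
-- def _runs(p, lo, hi):
--     """Maximal runs of equal values in p[lo:hi] as (label, start, end) triples."""
--     if hi - lo <= 1: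
--         return [(p[lo], lo, hi)] if hi > lo else []
--     mid = (lo + hi) // 2
--     left = _runs(p, lo, mid)
--     right = _runs(p, mid, hi)
--     if left[-1][0] == right[0][0]:
--         return left[:-1] + [(left[-1][0], left[-1][1], right[0][2])] + right[1:]
--     return left + right
-- ===== Notes on version B (the rewrite author's own statement) =====
-- stated objective: alternative
-- what changed: Replaces A's left-to-right three-variable (label/start/length) state machine plus trailing flush with a divide-and-conquer run decomposition (recursively split the index range in half and merge the two run lists at the boundary), and replaces the per-segment inner scan over required_pairs with a precomputed set of 'incomplete' labels (pairs with exactly one member present) used in a single filter.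
import Mathlib
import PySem

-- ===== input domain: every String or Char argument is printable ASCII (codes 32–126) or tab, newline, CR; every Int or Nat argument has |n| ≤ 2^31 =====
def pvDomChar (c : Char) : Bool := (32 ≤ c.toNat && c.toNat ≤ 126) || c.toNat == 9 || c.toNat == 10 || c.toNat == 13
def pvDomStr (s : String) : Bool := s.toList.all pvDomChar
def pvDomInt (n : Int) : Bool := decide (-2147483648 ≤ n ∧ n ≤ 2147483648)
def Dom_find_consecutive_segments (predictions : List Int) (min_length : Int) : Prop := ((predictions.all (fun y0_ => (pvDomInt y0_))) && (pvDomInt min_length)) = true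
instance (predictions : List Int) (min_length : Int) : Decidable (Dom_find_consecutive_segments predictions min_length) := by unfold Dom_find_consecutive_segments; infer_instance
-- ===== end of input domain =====

-- B replaces A's left-to-right three-variable run state machine with a divide-and-conquer run
-- decomposition (split the index range in half, merge the run lists at the boundary) and replaces
-- the per-segment pair-scan keep loop with a precomputed incomplete-label set; objective:
-- alternative. Equivalence is about the return value; neither version mutates its input.

-- ===== PORT A =====
-- inner loop over required_pairs with its break, as a recursion over the pair list
def pvCheckPairs (label : Int) (existing : List Int) : List (Int × Int) → Bool
  | [] => true
  | (p1, p2) :: rest =>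
    if label = p1 ∨ label = p2 then
      let partner := if label = p1 then p2 else p1
      if partner ∈ existing then pvCheckPairs label existing rest else false
    else pvCheckPairs label existing rest

def apply_cooccurrence_rules (segments : List (List (String × Int))) : List (List (String × Int)) :=
  let required_pairs : List (Int × Int) := [(2,3),(4,5),(6,7),(8,9),(10,11)]
  let existing_labels : PySem.Set Int :=
    PySem.Set.ofList (segments.map (fun s => (PySem.Dict.mk s).getD "label" 0))
  segments.foldl (fun segments_to_keep s =>
    if pvCheckPairs ((PySem.Dict.mk s).getD "label" 0) existing_labels required_pairs
    then segments_to_keep ++ [s] else segments_to_keep) []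

-- loop body of A's for-loop (state = (segments, current_label, current_start, current_length))
def pvStepA (predictions : List Int) (min_length : Int)
    (st : List (List (String × Int)) × Int × Int × Int) (i : Int) :
    List (List (String × Int)) × Int × Int × Int :=
  match st with
  | (segments, current_label, current_start, current_length) =>
    if PySem.List.pyGetD predictions i 0 = current_label then
      (segments, current_label, current_start, current_length + 1)
    else
      ((if current_length ≥ min_length ∧ current_label ≠ 0 then
          segments ++ [[("label", current_label), ("start", current_start), ("end", i)]]
        else segments),
       PySem.List.pyGetD predictions i 0, i, 1)

def find_consecutive_segments (predictions : List Int) (min_length : Int) : List (List (String × Int)) :=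
  let n : Int := PySem.List.len predictions
  match (PySem.List.pyRange 1 n 1).foldl (pvStepA predictions min_length)
      ([], PySem.List.pyGetD predictions 0 0, 0, 1) with
  | (segments, current_label, current_start, current_length) =>
    apply_cooccurrence_rules
      (if current_length ≥ min_length ∧ current_label ≠ 0 then
        segments ++ [[("label", current_label), ("start", current_start), ("end", n)]]
      else segments)

-- ===== PORT B =====
-- _runs(p, lo, hi): maximal runs of equal values in p[lo:hi] as (label, start, end) triples,
-- by divide and conquer (split at mid, merge the boundary run when the labels match)
def pvRuns (p : List Int) (lo hi : Int) : List (Int × Int × Int) :=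
  if hi - lo ≤ 1 then
    if lo < hi then [(PySem.List.pyGetD p lo 0, lo, hi)] else []
  else
    let mid := PySem.Int.floordiv (lo + hi) 2
    let left := pvRuns p lo mid
    let right := pvRuns p mid hi
    let lt := PySem.List.pyGetD left (-1) (0, 0, 0)
    let rh := PySem.List.pyGetD right 0 (0, 0, 0)
    if lt.1 = rh.1 then
      PySem.List.slice left none (some (-1)) ++ [(lt.1, lt.2.1, rh.2.2)]
        ++ PySem.List.slice right (some 1) none
    else left ++ right
termination_by (hi - lo).toNat
decreasing_by
  · have h1 : lo + 1 ≤ PySem.Int.floordiv (lo + hi) 2 :=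
      (PySem.Int.le_floordiv_iff_mul_le (by omega)).mpr (by omega)
    have h2 : PySem.Int.floordiv (lo + hi) 2 < hi :=
      (PySem.Int.floordiv_lt_iff_lt_mul (by omega)).mpr (by omega)
    omega
  · have h1 : lo + 1 ≤ PySem.Int.floordiv (lo + hi) 2 :=
      (PySem.Int.le_floordiv_iff_mul_le (by omega)).mpr (by omega)
    have h2 : PySem.Int.floordiv (lo + hi) 2 < hi :=
      (PySem.Int.floordiv_lt_iff_lt_mul (by omega)).mpr (by omega)
    omega

def find_consecutive_segments_alt (predictions : List Int) (min_length : Int) : List (List (String × Int)) :=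
  let runs := pvRuns predictions 0 (PySem.List.len predictions)
  let segments :=
    (runs.filter (fun r => decide (r.2.2 - r.2.1 ≥ min_length) && decide (r.1 ≠ 0))).map
      (fun r => [("label", r.1), ("start", r.2.1), ("end", r.2.2)])
  let present : PySem.Set Int :=
    PySem.Set.ofList (segments.map (fun s => (PySem.Dict.mk s).getD "label" 0))
  let pairs : List (Int × Int) := [(2,3),(4,5),(6,7),(8,9),(10,11)]
  let incomplete : PySem.Set Int :=
    PySem.Set.ofList
      ((pairs.filter (fun q => (decide (q.1 ∈ present)) != (decide (q.2 ∈ present)))).flatMap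
        (fun q => [q.1, q.2]))
  segments.filter (fun s => !(decide ((PySem.Dict.mk s).getD "label" 0 ∈ incomplete)))

-- ===== PRECONDITION & SPEC =====
-- Pre_ excludes only the empty list, on which Python A raises IndexError (predictions[0]).
def Pre_find_consecutive_segments (predictions : List Int) (min_length : Int) : Prop :=
  predictions ≠ []
instance (predictions : List Int) (min_length : Int) : Decidable (Pre_find_consecutive_segments predictions min_length) := by unfold Pre_find_consecutive_segments; infer_instance

def pvWitness_find_consecutive_segments : List Int × Int := ([3, 3, 3, 3, 2, 2, 2, 2, 0], 4)

def Spec_find_consecutive_segments (predictions : List Int) (min_length : Int) (out : List (List (String × Int))) : Prop := out = find_consecutive_segments_alt predictions min_length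
instance (predictions : List Int) (min_length : Int) (out : List (List (String × Int))) : Decidable (Spec_find_consecutive_segments predictions min_length out) := by unfold Spec_find_consecutive_segments; infer_instance

-- ===== CLAIM (what is proved, stated in full; the proofs are below) =====
def Claim_equal_find_consecutive_segments : Prop := ∀ (predictions : List Int) (min_length : Int), Dom_find_consecutive_segments predictions min_length → Pre_find_consecutive_segments predictions min_length → Spec_find_consecutive_segments predictions min_length (find_consecutive_segments predictions min_length)

-- ===== LEMMAS AND PROOFS =====

-- proof-side descriptions: cut points and segments, shared characterisation of both ports

-- cut points of the whole list: indices where a new run starts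
def pvCuts (predictions : List Int) : List Int :=
  (PySem.List.pyRange 0 (PySem.List.len predictions) 1).filter (fun i =>
    i == 0 || !(PySem.List.pyGetD predictions i 0 == PySem.List.pyGetD predictions (i-1) 0))

def pvLastCut (xs : List Int) : Int := (pvCuts xs).getLastD 0

-- a run (a, b) becomes a segment dict if it is long enough and not label 0
def pvSegOf (predictions : List Int) (min_length : Int) (p : Int × Int) : Option (List (String × Int)) :=
  if p.2 - p.1 ≥ min_length ∧ PySem.List.pyGetD predictions p.1 0 ≠ 0 then
    some [("label", PySem.List.pyGetD predictions p.1 0), ("start", p.1), ("end", p.2)]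
  else none

def pvLabelOf (s : List (String × Int)) : Int := (PySem.Dict.mk s).getD "label" 0

-- cut points of the index interval [lo, hi) (always starting with lo)
def cutsIn (p : List Int) (lo hi : Int) : List Int :=
  lo :: (PySem.List.pyRange (lo+1) hi 1).filter (fun i =>
    !(PySem.List.pyGetD p i 0 == PySem.List.pyGetD p (i-1) 0))

-- the run list of [lo, hi), read off the cut points
def runsIn (p : List Int) (lo hi : Int) : List (Int × Int × Int) :=
  ((cutsIn p lo hi ++ [hi]).zip (cutsIn p lo hi ++ [hi]).tail).map
    (fun q => (PySem.List.pyGetD p q.1 0, q.1, q.2))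

-- reading an index on the left part of an append
lemma pyGetD_append_left (xs ys : List Int) (i d : Int) (h0 : 0 ≤ i) (h : i < (xs.length : Int)) :
    PySem.List.pyGetD (xs ++ ys) i d = PySem.List.pyGetD xs i d := by
  rw [PySem.List.pyGetD_eq_getElem _ d h0 (by simp; omega),
      PySem.List.pyGetD_eq_getElem _ d h0 h]
  exact List.getElem_append_left (by omega)

lemma pyGetD_append_len (xs : List Int) (x d : Int) :
    PySem.List.pyGetD (xs ++ [x]) (xs.length : Int) d = x := by
  rw [PySem.List.pyGetD_eq_getElem _ d (by positivity) (by simp)]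
  simp

lemma pvCuts_snoc (xs : List Int) (x : Int) (hne : xs ≠ []) :
    pvCuts (xs ++ [x]) =
      pvCuts xs ++ (if x = PySem.List.pyGetD xs ((xs.length : Int) - 1) 0 then [] else [(xs.length : Int)]) := by
  have hn : 1 ≤ (xs.length : Int) := by
    have := List.length_pos_iff.mpr hne; omega
  unfold pvCuts
  simp only [PySem.List.len_eq]
  have hlen : (((xs ++ [x]).length : Nat) : Int) = (xs.length : Int) + 1 := by simp
  rw [hlen, PySem.List.pyRange_one_succ_right (by omega), List.filter_append]
  congr 1
  · apply List.filter_congr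
    intro i hi
    rcases (PySem.List.mem_pyRange_one).mp hi with ⟨h0, h1⟩
    by_cases hz : i = 0
    · simp [hz]
    · rw [pyGetD_append_left _ _ _ _ (by omega) (by omega),
          pyGetD_append_left _ _ _ _ (by omega) (by omega)]
  · rw [List.filter_singleton]
    have h1 : PySem.List.pyGetD (xs ++ [x]) (xs.length : Int) 0 = x := pyGetD_append_len xs x 0
    have h2 : PySem.List.pyGetD (xs ++ [x]) ((xs.length : Int) - 1) 0
        = PySem.List.pyGetD xs ((xs.length : Int) - 1) 0 :=
      pyGetD_append_left _ _ _ _ (by omega) (by omega)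
    rw [h1, h2]
    by_cases hx : x = PySem.List.pyGetD xs ((xs.length : Int) - 1) 0 <;>
      simp [Bool.cond_eq_ite, hne, hx]

lemma zip_tail_snoc (c : List Int) (hc : c ≠ []) (n : Int) :
    (c ++ [n]).zip (c ++ [n]).tail = c.zip c.tail ++ [(c.getLastD 0, n)] := by
  induction c with
  | nil => simp at hc
  | cons a t ih =>
    cases t with
    | nil => simp
    | cons b t' => simpa using ih (by simp)

-- the loop invariant: A's fold state, described by the cut points
lemma invA (xs : List Int) (hne : xs ≠ []) (m : Int) :
    (PySem.List.pyRange 1 (PySem.List.len xs) 1).foldl (pvStepA xs m)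
        ([], PySem.List.pyGetD xs 0 0, 0, 1) =
      (((pvCuts xs).zip (pvCuts xs).tail).filterMap (pvSegOf xs m),
        PySem.List.pyGetD xs (pvLastCut xs) 0, pvLastCut xs, (xs.length : Int) - pvLastCut xs)
    ∧ PySem.List.pyGetD xs (pvLastCut xs) 0 = PySem.List.pyGetD xs ((xs.length : Int) - 1) 0
    ∧ 0 ≤ pvLastCut xs ∧ pvLastCut xs < (xs.length : Int)
    ∧ pvCuts xs ≠ [] := by
  induction xs using List.reverseRecOn with
  | nil => exact absurd rfl hne
  | append_singleton ys x ih =>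
    rcases eq_or_ne ys [] with rfl | hys
    · have hpr : PySem.List.pyRange 0 (1:Int) 1 = [0] := by decide
      have hr : PySem.List.pyRange 1 (1:Int) 1 = [] := by decide
      have hc : pvCuts [x] = [0] := by simp [pvCuts, hpr]
      refine ⟨?_, ?_, ?_, ?_, ?_⟩ <;>
        simp [hc, hr, pvLastCut]
    · obtain ⟨hfold, hlast, hL0, hLn, hcne⟩ := ih hys
      have hn1 : 1 ≤ (ys.length : Int) := by have := List.length_pos_iff.mpr hys; omega
      have hlen : (PySem.List.len (ys ++ [x])) = (ys.length : Int) + 1 := by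
        simp [PySem.List.len_eq]
      have hrange : PySem.List.pyRange 1 ((ys.length : Int) + 1) 1
          = PySem.List.pyRange 1 (ys.length : Int) 1 ++ [(ys.length : Int)] :=
        PySem.List.pyRange_one_succ_right (by omega)
      have hinit : PySem.List.pyGetD (ys ++ [x]) 0 0 = PySem.List.pyGetD ys 0 0 :=
        pyGetD_append_left _ _ _ _ le_rfl (by omega)
      have hcongr : ∀ (acc : List (List (String × Int)) × Int × Int × Int) (i : Int),
          i ∈ PySem.List.pyRange 1 (ys.length : Int) 1 →
          pvStepA (ys ++ [x]) m acc i = pvStepA ys m acc i := by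
        intro acc i hi
        rcases (PySem.List.mem_pyRange_one).mp hi with ⟨hi1, hi2⟩
        obtain ⟨segs, cl, cs, cln⟩ := acc
        simp only [pvStepA, pyGetD_append_left ys [x] i 0 (by omega) (by omega)]
      have hfold' : (PySem.List.pyRange 1 (PySem.List.len (ys ++ [x])) 1).foldl
            (pvStepA (ys ++ [x]) m) ([], PySem.List.pyGetD (ys ++ [x]) 0 0, 0, 1)
          = pvStepA (ys ++ [x]) m (((pvCuts ys).zip (pvCuts ys).tail).filterMap (pvSegOf ys m),
              PySem.List.pyGetD ys (pvLastCut ys) 0, pvLastCut ys, (ys.length : Int) - pvLastCut ys)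
            (ys.length : Int) := by
        have hfold2 := hfold
        simp only [PySem.List.len_eq] at hfold2
        rw [hlen, hrange, List.foldl_append, hinit,
            PySem.List.foldl_congr_mem _ _ _ _ hcongr, hfold2]
        simp
      have hx : PySem.List.pyGetD (ys ++ [x]) (ys.length : Int) 0 = x := pyGetD_append_len ys x 0
      have hgetL : PySem.List.pyGetD (ys ++ [x]) (pvLastCut ys) 0
          = PySem.List.pyGetD ys (pvLastCut ys) 0 :=
        pyGetD_append_left _ _ _ _ hL0 (by omega)
      have hcuts := pvCuts_snoc ys x hys
      have hlen' : (((ys ++ [x]).length : Nat) : Int) = (ys.length : Int) + 1 := by simp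
      have hsegcongr : ∀ p ∈ (pvCuts ys).zip (pvCuts ys).tail,
          pvSegOf (ys ++ [x]) m p = pvSegOf ys m p := by
        intro p hp
        obtain ⟨a, b⟩ := p
        have hp1 : a ∈ pvCuts ys := (List.of_mem_zip hp).1
        have hmem : a ∈ PySem.List.pyRange 0 (PySem.List.len ys) 1 := List.mem_of_mem_filter hp1
        rcases (PySem.List.mem_pyRange_one).mp hmem with ⟨hq0, hq1⟩
        simp only [PySem.List.len_eq] at hq1
        simp only [pvSegOf, pyGetD_append_left ys [x] a 0 hq0 hq1]
      by_cases hxeq : x = PySem.List.pyGetD ys (pvLastCut ys) 0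
      · -- the final run continues: the cut list is unchanged
        rw [if_pos (hxeq.trans hlast), List.append_nil] at hcuts
        have hLc : pvLastCut (ys ++ [x]) = pvLastCut ys := by
          unfold pvLastCut; rw [hcuts]
        have hF : ((pvCuts (ys ++ [x])).zip (pvCuts (ys ++ [x])).tail).filterMap
              (pvSegOf (ys ++ [x]) m)
            = ((pvCuts ys).zip (pvCuts ys).tail).filterMap (pvSegOf ys m) := by
          rw [hcuts]; exact List.filterMap_congr hsegcongr
        refine ⟨?_, ?_, ?_, ?_, ?_⟩
        · rw [hfold']
          simp only [pvStepA, hx, hF, hLc, hgetL, hlen']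
          rw [if_pos hxeq]
          simp only [Prod.mk.injEq]
          exact ⟨by trivial, by trivial, by trivial, by omega⟩
        · rw [hLc, hgetL, hlen',
             show (ys.length : Int) + 1 - 1 = (ys.length : Int) from by omega, hx]
          exact hxeq.symm
        · rw [hLc]; exact hL0
        · rw [hLc, hlen']; omega
        · rw [hcuts]; exact hcne
      · -- a new run starts at index len ys
        have hnec : ¬ x = PySem.List.pyGetD ys ((ys.length : Int) - 1) 0 := by
          rw [← hlast]; exact hxeq
        rw [if_neg hnec] at hcuts
        have hLc : pvLastCut (ys ++ [x]) = (ys.length : Int) := by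
          unfold pvLastCut; rw [hcuts]; simp
        have hzip : (pvCuts (ys ++ [x])).zip (pvCuts (ys ++ [x])).tail
            = (pvCuts ys).zip (pvCuts ys).tail ++ [(pvLastCut ys, (ys.length : Int))] := by
          rw [hcuts, zip_tail_snoc _ hcne]; rfl
        have hF : ((pvCuts (ys ++ [x])).zip (pvCuts (ys ++ [x])).tail).filterMap
              (pvSegOf (ys ++ [x]) m)
            = ((pvCuts ys).zip (pvCuts ys).tail).filterMap (pvSegOf ys m)
              ++ (if (ys.length : Int) - pvLastCut ys ≥ m ∧ PySem.List.pyGetD ys (pvLastCut ys) 0 ≠ 0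
                  then [[("label", PySem.List.pyGetD ys (pvLastCut ys) 0),
                        ("start", pvLastCut ys), ("end", (ys.length : Int))]]
                  else []) := by
          rw [hzip, List.filterMap_append, List.filterMap_congr hsegcongr]
          congr 1
          simp only [List.filterMap, pvSegOf, hgetL]
          split_ifs <;> rfl
        refine ⟨?_, ?_, ?_, ?_, ?_⟩
        · rw [hfold']
          simp only [pvStepA, hx, if_neg hxeq, hF, hLc, hlen']
          split_ifs with hcond <;> simp only [List.append_nil, Prod.mk.injEq] <;>
            exact ⟨by trivial, by trivial, by trivial, by omega⟩
        · rw [hLc, hlen',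
             show (ys.length : Int) + 1 - 1 = (ys.length : Int) from by omega, hx]
        · rw [hLc]; omega
        · rw [hLc, hlen']; omega
        · rw [hcuts]; simp

-- ---- relating the divide-and-conquer port to the cut-point description ----

lemma cuts_eq_cutsIn (p : List Int) (hne : p ≠ []) :
    pvCuts p = cutsIn p 0 (p.length : Int) := by
  have hn : 0 < (p.length : Int) := by have := List.length_pos_iff.mpr hne; omega
  unfold pvCuts cutsIn
  simp only [PySem.List.len_eq]
  rw [PySem.List.pyRange_one_cons hn, List.filter_cons]
  simp only [show ((0:Int) == 0) = true from rfl, Bool.true_or, if_true, zero_add]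
  congr 1
  apply List.filter_congr
  intro i hi
  rcases (PySem.List.mem_pyRange_one).mp hi with ⟨h1, _⟩
  have : (i == (0:Int)) = false := by simp; omega
  simp [this]

lemma cutsIn_ne_nil (p : List Int) (lo hi : Int) : cutsIn p lo hi ≠ [] := by
  simp [cutsIn]

lemma cutsIn_mem (p : List Int) (lo hi : Int) (hlh : lo < hi) :
    ∀ i ∈ cutsIn p lo hi, lo ≤ i ∧ i < hi := by
  intro i hi
  rcases List.mem_cons.mp hi with rfl | hmem
  · exact ⟨le_refl _, hlh⟩
  · rcases (PySem.List.mem_pyRange_one).mp (List.mem_of_mem_filter hmem) with ⟨h1, h2⟩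
    exact ⟨by omega, h2⟩

lemma cutsIn_pairwise (p : List Int) (lo hi : Int) :
    (cutsIn p lo hi).Pairwise (· < ·) := by
  unfold cutsIn
  refine List.pairwise_cons.mpr ⟨?_, ?_⟩
  · intro i hi
    rcases (PySem.List.mem_pyRange_one).mp (List.mem_of_mem_filter hi) with ⟨h1, _⟩
    omega
  · exact (PySem.List.pairwise_lt_pyRange_one _ _).sublist List.filter_sublist

lemma mem_le_getLastD (l : List Int) : l.Pairwise (· < ·) → ∀ x ∈ l, ∀ d, x ≤ l.getLastD d := by
  induction l with
  | nil => simp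
  | cons a t ih =>
    intro hl x hx d
    have hpw := List.pairwise_cons.mp hl
    cases t with
    | nil => simp at hx ⊢; omega
    | cons b t' =>
      simp only [List.getLastD_cons]
      rcases List.mem_cons.mp hx with rfl | hxt
      · have hb : x < b := hpw.1 b (by simp)
        have h2 := ih hpw.2 b (by simp) d
        simp only [List.getLastD_cons] at h2
        omega
      · have h2 := ih hpw.2 x hxt d
        simp only [List.getLastD_cons] at h2
        exact h2

lemma getLastD_mem (l : List Int) : l ≠ [] → ∀ d, l.getLastD d ∈ l := by
  induction l with
  | nil => intro h; exact absurd rfl h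
  | cons a t ih =>
    intro _ d
    cases t with
    | nil => simp
    | cons b t' =>
      simp only [List.getLastD_cons]
      have := ih (by simp) a
      simp only [List.getLastD_cons] at this
      exact List.mem_cons_of_mem a this

-- everything from the last cut to hi carries the same value
lemma chain_last (p : List Int) (lo hi : Int) (hlh : lo < hi) :
    ∀ j, (cutsIn p lo hi).getLastD 0 ≤ j → j < hi →
      PySem.List.pyGetD p j 0 = PySem.List.pyGetD p ((cutsIn p lo hi).getLastD 0) 0 := by
  set c := (cutsIn p lo hi).getLastD 0 with hc
  have hcmem : c ∈ cutsIn p lo hi := getLastD_mem _ (cutsIn_ne_nil p lo hi) 0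
  have hcb := cutsIn_mem p lo hi hlh c hcmem
  have key : ∀ k : Nat, c + (k : Int) < hi →
      PySem.List.pyGetD p (c + (k : Int)) 0 = PySem.List.pyGetD p c 0 := by
    intro k
    induction k with
    | zero => intro _; simp
    | succ k ihk =>
      intro hk
      have hk1 : c + ((k : Int) + 1) < hi := by push_cast at hk ⊢; omega
      have hkk : c + (k : Int) < hi := by omega
      have hstep : PySem.List.pyGetD p (c + (k : Int) + 1) 0
          = PySem.List.pyGetD p (c + (k : Int)) 0 := by
        by_contra hne
        have hmemf : (c + (k : Int) + 1) ∈ cutsIn p lo hi := by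
          unfold cutsIn
          refine List.mem_cons_of_mem _ (List.mem_filter.mpr ⟨?_, ?_⟩)
          · exact (PySem.List.mem_pyRange_one).mpr ⟨by omega, by omega⟩
          · simp only [Bool.not_eq_eq_eq_not, Bool.not_true, beq_eq_false_iff_ne, ne_eq]
            show ¬ (PySem.List.pyGetD p (c + (k:Int) + 1) 0
                = PySem.List.pyGetD p (c + (k:Int) + 1 - 1) 0)
            have : c + (k : Int) + 1 - 1 = c + (k : Int) := by omega
            rw [this]
            exact hne
        have := mem_le_getLastD _ (cutsIn_pairwise p lo hi) _ hmemf 0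
        omega
      calc PySem.List.pyGetD p (c + ((k : Nat) + 1 : Nat) : Int) 0
          = PySem.List.pyGetD p (c + (k : Int) + 1) 0 := by norm_num; ring_nf
        _ = PySem.List.pyGetD p (c + (k : Int)) 0 := hstep
        _ = PySem.List.pyGetD p c 0 := ihk hkk
  intro j hcj hjh
  have hjc : j = c + ((j - c).toNat : Int) := by omega
  rw [hjc]
  exact key _ (by omega)

-- the boundary comparison: p[mid-1] equals p[last cut of [lo,mid)]
lemma boundary_eq (p : List Int) (lo mid : Int) (hlm : lo < mid) :
    PySem.List.pyGetD p (mid - 1) 0 = PySem.List.pyGetD p ((cutsIn p lo mid).getLastD 0) 0 := by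
  have hcmem : (cutsIn p lo mid).getLastD 0 ∈ cutsIn p lo mid :=
    getLastD_mem _ (cutsIn_ne_nil p lo mid) 0
  have hcb := cutsIn_mem p lo mid hlm _ hcmem
  exact chain_last p lo mid hlm (mid - 1) (by omega) (by omega)

lemma cutsIn_split (p : List Int) (lo mid hi : Int) (h1 : lo < mid) (h2 : mid < hi) :
    cutsIn p lo hi = cutsIn p lo mid
      ++ (if PySem.List.pyGetD p mid 0 = PySem.List.pyGetD p (mid-1) 0 then [] else [mid])
      ++ (cutsIn p mid hi).tail := by
  unfold cutsIn
  simp only [List.tail_cons, List.cons_append]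
  congr 1
  rw [PySem.List.pyRange_one_append (lo+1) mid hi (by omega) (by omega),
      PySem.List.pyRange_one_cons h2, List.filter_append, List.filter_cons]
  by_cases heq : PySem.List.pyGetD p mid 0 = PySem.List.pyGetD p (mid-1) 0
  · simp [heq]
  · simp [heq]

lemma zip_tail_cons (a : Int) (Z : List Int) (hZ : Z ≠ []) :
    (a :: Z).zip Z = (a, Z.headD 0) :: Z.zip Z.tail := by
  cases Z with
  | nil => simp at hZ
  | cons z Z' => simp

lemma zip_tail_append (X Y : List Int) (hX : X ≠ []) (hY : Y ≠ []) :
    (X ++ Y).zip (X ++ Y).tail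
      = X.zip X.tail ++ (X.getLastD 0, Y.headD 0) :: Y.zip Y.tail := by
  induction X with
  | nil => simp at hX
  | cons a t ih =>
    cases t with
    | nil =>
      cases Y with
      | nil => simp at hY
      | cons y Y' => simp
    | cons b t' =>
      have := ih (by simp)
      simpa using this

-- main lemma: the divide-and-conquer run list is the cut-point run list
lemma runs_eq_runsIn (p : List Int) :
    ∀ (fuel : Nat) (lo hi : Int), (hi - lo).toNat ≤ fuel → lo < hi →
      pvRuns p lo hi = runsIn p lo hi := by
  intro fuel
  induction fuel with
  | zero => intro lo hi hf hlt; omega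
  | succ f ihf =>
    intro lo hi hf hlt
    by_cases hbase : hi - lo ≤ 1
    · have h1 : hi = lo + 1 := by omega
      subst h1
      rw [pvRuns, if_pos (by omega), if_pos hlt]
      unfold runsIn cutsIn
      rw [PySem.List.pyRange_one_eq_nil (by omega)]
      simp
    · rw [pvRuns, if_neg hbase]
      have h1 : lo + 1 ≤ PySem.Int.floordiv (lo + hi) 2 :=
        (PySem.Int.le_floordiv_iff_mul_le (by omega)).mpr (by omega)
      have h2 : PySem.Int.floordiv (lo + hi) 2 < hi :=
        (PySem.Int.floordiv_lt_iff_lt_mul (by omega)).mpr (by omega)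
      set mid := PySem.Int.floordiv (lo + hi) 2 with hmiddef
      have ihl : pvRuns p lo mid = runsIn p lo mid := ihf lo mid (by omega) (by omega)
      have ihr : pvRuns p mid hi = runsIn p mid hi := ihf mid hi (by omega) h2
      simp only [ihl, ihr]
      -- names for the pieces
      set X := cutsIn p lo mid with hX
      set T := (PySem.List.pyRange (mid+1) hi 1).filter (fun i =>
        !(PySem.List.pyGetD p i 0 == PySem.List.pyGetD p (i-1) 0)) with hT
      have hXne : X ≠ [] := cutsIn_ne_nil p lo mid
      have hTY : (T ++ [hi] : List Int) ≠ [] := by simp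
      set c := X.getLastD 0 with hcdef
      have hMH : cutsIn p mid hi = mid :: T := rfl
      -- the left run list ends with the run (p[c], c, mid)
      have hleft : runsIn p lo mid
          = (X.zip X.tail).map (fun q => (PySem.List.pyGetD p q.1 0, q.1, q.2))
            ++ [(PySem.List.pyGetD p c 0, c, mid)] := by
        unfold runsIn
        rw [← hX, zip_tail_snoc X hXne mid, List.map_append]
        rfl
      -- the right run list starts with the run (p[mid], mid, h')
      have hright : runsIn p mid hi
          = (PySem.List.pyGetD p mid 0, mid, (T ++ [hi]).headD 0)
            :: ((T ++ [hi]).zip (T ++ [hi]).tail).map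
                (fun q => (PySem.List.pyGetD p q.1 0, q.1, q.2)) := by
        unfold runsIn
        rw [hMH]
        have : ((mid :: T) ++ [hi] : List Int) = mid :: (T ++ [hi]) := rfl
        rw [this]
        have htl : (mid :: (T ++ [hi])).tail = T ++ [hi] := rfl
        rw [htl, zip_tail_cons mid (T ++ [hi]) hTY, List.map_cons]
      have hbnd : PySem.List.pyGetD p (mid - 1) 0 = PySem.List.pyGetD p c 0 :=
        boundary_eq p lo mid (by omega)
      -- evaluate the port's primitives on these shapes
      rw [hleft, hright]
      rw [PySem.List.pyGetD_neg_one_append_singleton, PySem.List.pyGetD_zero_cons,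
          PySem.List.slice_to_neg_one, PySem.List.slice_from_one,
          List.dropLast_concat, List.tail_cons]
      -- the target, split at mid
      unfold runsIn
      rw [cutsIn_split p lo mid hi (by omega) h2, hMH, List.tail_cons]
      dsimp only
      by_cases hcond : PySem.List.pyGetD p mid 0 = PySem.List.pyGetD p (mid - 1) 0
      · -- boundary labels match: the two boundary runs merge
        have hcc : PySem.List.pyGetD p c 0 = PySem.List.pyGetD p mid 0 := by
          rw [hcond, hbnd]
        rw [if_pos hcc, if_pos hcond]
        have hsplit : (X ++ [] ++ T) ++ [hi] = X ++ (T ++ [hi]) := by simp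
        rw [hsplit, zip_tail_append X (T ++ [hi]) hXne hTY, List.map_append, List.map_cons]
        simp [hcdef, List.getLastD_eq_getLast?]
      · have hcc : ¬ (PySem.List.pyGetD p c 0 = PySem.List.pyGetD p mid 0) := by
          rw [← hbnd]; exact fun h => hcond h.symm
        rw [if_neg hcc, if_neg hcond]
        have hsplit : (X ++ [mid] ++ T) ++ [hi] = X ++ (mid :: (T ++ [hi])) := by simp
        rw [hsplit, zip_tail_append X (mid :: (T ++ [hi])) hXne (by simp),
            List.map_append, List.map_cons]
        have htl2 : (mid :: (T ++ [hi])).tail = T ++ [hi] := rfl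
        rw [htl2, zip_tail_cons mid (T ++ [hi]) hTY, List.map_cons]
        simp [hcdef, List.getLastD_eq_getLast?]

-- turning runs into segment dicts: filterMap over pairs = comprehension over triples
lemma filterMap_segOf (p : List Int) (m : Int) (P : List (Int × Int)) :
    P.filterMap (pvSegOf p m)
      = ((P.map (fun q => (PySem.List.pyGetD p q.1 0, q.1, q.2))).filter
            (fun r => decide (r.2.2 - r.2.1 ≥ m) && decide (r.1 ≠ 0))).map
          (fun r => [("label", r.1), ("start", r.2.1), ("end", r.2.2)]) := by
  induction P with
  | nil => rfl
  | cons q rest ih =>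
    by_cases hc : q.2 - q.1 ≥ m ∧ PySem.List.pyGetD p q.1 0 ≠ 0
    · have h1 : pvSegOf p m q
          = some [("label", PySem.List.pyGetD p q.1 0), ("start", q.1), ("end", q.2)] := by
        simp [pvSegOf, hc]
      have h2 : (decide (q.2 - q.1 ≥ m) && decide (PySem.List.pyGetD p q.1 0 ≠ 0)) = true := by
        simp [hc.1, hc.2]
      simp only [List.filterMap_cons, List.map_cons, List.filter_cons, h1, h2, if_true]
      rw [ih]
    · have h1 : pvSegOf p m q = none := if_neg hc
      have h2 : (decide (q.2 - q.1 ≥ m) && decide (PySem.List.pyGetD p q.1 0 ≠ 0)) = false := by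
        rcases Decidable.not_and_iff_not_or_not.mp hc with h | h <;> simp [h]
      simp only [List.filterMap_cons, List.map_cons, List.filter_cons, h1, h2, if_false]
      exact ih

-- A's keep test over the five pairs = membership test against the incomplete-label list
lemma keep_eq (label : Int) (E : List Int) (h : label ∈ E) :
    pvCheckPairs label E [(2,3),(4,5),(6,7),(8,9),(10,11)] =
      !(decide (label ∈ PySem.Set.ofList
        ((([((2:Int),(3:Int)),(4,5),(6,7),(8,9),(10,11)].filter
            (fun q => (decide (q.1 ∈ E)) != (decide (q.2 ∈ E)))).flatMap
          (fun q => [q.1, q.2]))))) := by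
  rcases eq_or_ne label 2 with rfl | h2
  · by_cases hp : (3:Int) ∈ E <;>
      simp [pvCheckPairs, PySem.Set.mem_ofList, List.mem_flatMap, h, hp] <;> aesop
  rcases eq_or_ne label 3 with rfl | h3
  · by_cases hp : (2:Int) ∈ E <;>
      simp [pvCheckPairs, PySem.Set.mem_ofList, List.mem_flatMap, h, hp] <;> aesop
  rcases eq_or_ne label 4 with rfl | h4
  · by_cases hp : (5:Int) ∈ E <;>
      simp [pvCheckPairs, PySem.Set.mem_ofList, List.mem_flatMap, h, hp] <;> aesop
  rcases eq_or_ne label 5 with rfl | h5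
  · by_cases hp : (4:Int) ∈ E <;>
      simp [pvCheckPairs, PySem.Set.mem_ofList, List.mem_flatMap, h, hp] <;> aesop
  rcases eq_or_ne label 6 with rfl | h6
  · by_cases hp : (7:Int) ∈ E <;>
      simp [pvCheckPairs, PySem.Set.mem_ofList, List.mem_flatMap, h, hp] <;> aesop
  rcases eq_or_ne label 7 with rfl | h7
  · by_cases hp : (6:Int) ∈ E <;>
      simp [pvCheckPairs, PySem.Set.mem_ofList, List.mem_flatMap, h, hp] <;> aesop
  rcases eq_or_ne label 8 with rfl | h8
  · by_cases hp : (9:Int) ∈ E <;>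
      simp [pvCheckPairs, PySem.Set.mem_ofList, List.mem_flatMap, h, hp] <;> aesop
  rcases eq_or_ne label 9 with rfl | h9
  · by_cases hp : (8:Int) ∈ E <;>
      simp [pvCheckPairs, PySem.Set.mem_ofList, List.mem_flatMap, h, hp] <;> aesop
  rcases eq_or_ne label 10 with rfl | h10
  · by_cases hp : (11:Int) ∈ E <;>
      simp [pvCheckPairs, PySem.Set.mem_ofList, List.mem_flatMap, h, hp] <;> aesop
  rcases eq_or_ne label 11 with rfl | h11
  · by_cases hp : (10:Int) ∈ E <;>
      simp [pvCheckPairs, PySem.Set.mem_ofList, List.mem_flatMap, h, hp] <;> aesop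
  simp [pvCheckPairs, PySem.Set.mem_ofList, List.mem_flatMap, h2, h3, h4, h5, h6, h7, h8, h9, h10, h11]
  rintro x y hxy -
  rcases hxy with ⟨rfl, rfl⟩ | ⟨rfl, rfl⟩ | ⟨rfl, rfl⟩ | ⟨rfl, rfl⟩ | ⟨rfl, rfl⟩ <;>
    exact ⟨by omega, by omega⟩

-- A's co-occurrence pass = B's incomplete-set filter, for any segment list
lemma cooc_eq (segs : List (List (String × Int))) :
    apply_cooccurrence_rules segs =
      segs.filter (fun s =>
        !(decide ((PySem.Dict.mk s).getD "label" 0 ∈ PySem.Set.ofList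
          ((([((2:Int),(3:Int)),(4,5),(6,7),(8,9),(10,11)].filter
              (fun q => (decide (q.1 ∈ PySem.Set.ofList
                    (segs.map (fun s => (PySem.Dict.mk s).getD "label" 0))))
                != (decide (q.2 ∈ PySem.Set.ofList
                    (segs.map (fun s => (PySem.Dict.mk s).getD "label" 0)))))).flatMap
            (fun q => [q.1, q.2])))))) := by
  unfold apply_cooccurrence_rules
  rw [PySem.List.foldl_append_if_eq_filter]
  simp only [List.nil_append]
  apply List.filter_congr
  intro s hs
  exact keep_eq _ _ ((PySem.Set.mem_ofList _ _).mpr (List.mem_map_of_mem hs))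

-- ===== VERDICT (by name: the statement is the Claim_ definition above) =====
theorem find_consecutive_segments_spec : Claim_equal_find_consecutive_segments := by
  intro p m _ hpre
  unfold Spec_find_consecutive_segments find_consecutive_segments find_consecutive_segments_alt
  obtain ⟨hfold, hlast, hL0, hLn, hcne⟩ := invA p hpre m
  dsimp only
  rw [hfold]
  have hn : 0 < (p.length : Int) := by
    have := List.length_pos_iff.mpr hpre; omega
  have hsegs : (if (p.length : Int) - pvLastCut p ≥ m ∧ PySem.List.pyGetD p (pvLastCut p) 0 ≠ 0
        then ((pvCuts p).zip (pvCuts p).tail).filterMap (pvSegOf p m)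
          ++ [[("label", PySem.List.pyGetD p (pvLastCut p) 0), ("start", pvLastCut p),
               ("end", PySem.List.len p)]]
        else ((pvCuts p).zip (pvCuts p).tail).filterMap (pvSegOf p m))
      = ((pvCuts p ++ [PySem.List.len p]).zip (pvCuts p ++ [PySem.List.len p]).tail).filterMap
          (pvSegOf p m) := by
    rw [PySem.List.len_eq, zip_tail_snoc _ hcne, List.filterMap_append]
    show _ = _ ++ List.filterMap (pvSegOf p m) [(pvLastCut p, (p.length : Int))]
    simp only [List.filterMap_cons, List.filterMap_nil, pvSegOf]
    split_ifs <;> simp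
  rw [hsegs, cooc_eq]
  -- the B side: divide-and-conquer runs = the same cut-point segment list
  have hruns : pvRuns p 0 (PySem.List.len p) = runsIn p 0 (p.length : Int) := by
    rw [PySem.List.len_eq]
    exact runs_eq_runsIn p (p.length + 1) 0 (p.length : Int) (by omega) hn
  have hcuts : cutsIn p 0 (p.length : Int) = pvCuts p := (cuts_eq_cutsIn p hpre).symm
  have hB : (List.map (fun r => [("label", r.1), ("start", r.2.1), ("end", r.2.2)])
        ((pvRuns p 0 (PySem.List.len p)).filter
          (fun r => decide (r.2.2 - r.2.1 ≥ m) && decide (r.1 ≠ 0))))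
      = ((pvCuts p ++ [PySem.List.len p]).zip (pvCuts p ++ [PySem.List.len p]).tail).filterMap
          (pvSegOf p m) := by
    rw [hruns, filterMap_segOf]
    unfold runsIn
    rw [hcuts, PySem.List.len_eq]
  rw [← hB]
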